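-- pv_equiv track=rewrite | github.com/JornGitHub/SATSolver | extensions/CDCL.py | current_state
-- ===== SOURCE A (Python) =====
-- def current_state(clause,assignments,X,Y):
--     unit = 0
--
--     # Check if one of the literals is watching the implemented clause
--
--     if X in assignments or Y in assignments:
--         return "SAT",assignments,X,Y,unit
--     symbols=[]
--     for literal in clause:
--         if -literal not in assignments:
--             symbols.append(literal)
--         if literal in assignments :
--             if -X not in assignments :
--                 return "SAT",assignments,X,literal,unit
--             return "SAT",assignments,literal,Y,unit
--
--     # If we have 1 literal remaining, we have a unit clause
--
--     if len(symbols) == 1: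
--         return "UNIT",assignments,X,Y,symbols[0]
--
--     # If none remain, that means the current assignments are unsatisfiable
--
--     if len(symbols) == 0:
--         return "UNSAT",assignments,X,Y,unit
--
--     # If we have found 2 new literals, return and continue the solving process
--
--     else :
--         return "NEW",assignments,symbols[0],symbols[1],unit
-- ===== SOURCE B (Python) =====
-- def current_state(clause, assignments, X, Y):
--     # same SAT guard on the watched literals
--     if X in assignments or Y in assignments:
--         return "SAT", assignments, X, Y, 0
--     # pass 1: find the first satisfied literal (A's fused loop returns there)
--     sat = next((l for l in clause if l in assignments), None)
--     if sat is not None: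
--         if -X not in assignments:
--             return "SAT", assignments, X, sat, 0
--         return "SAT", assignments, sat, Y, 0
--     # pass 2: the unfalsified literals
--     symbols = [l for l in clause if -l not in assignments]
--     if len(symbols) == 1:
--         return "UNIT", assignments, X, Y, symbols[0]
--     if not symbols:
--         return "UNSAT", assignments, X, Y, 0
--     return "NEW", assignments, symbols[0], symbols[1], 0
-- ===== Notes on version B (the rewrite author's own statement) =====
-- stated objective: simpler
-- what changed: A's single fused loop (which interleaves building the unfalsified-symbols list with the satisfied-literal check) is split into a find-first scan for a satisfied literal plus, only if none exists, a filter comprehension collecting the unfalsified literals.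
import Mathlib
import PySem

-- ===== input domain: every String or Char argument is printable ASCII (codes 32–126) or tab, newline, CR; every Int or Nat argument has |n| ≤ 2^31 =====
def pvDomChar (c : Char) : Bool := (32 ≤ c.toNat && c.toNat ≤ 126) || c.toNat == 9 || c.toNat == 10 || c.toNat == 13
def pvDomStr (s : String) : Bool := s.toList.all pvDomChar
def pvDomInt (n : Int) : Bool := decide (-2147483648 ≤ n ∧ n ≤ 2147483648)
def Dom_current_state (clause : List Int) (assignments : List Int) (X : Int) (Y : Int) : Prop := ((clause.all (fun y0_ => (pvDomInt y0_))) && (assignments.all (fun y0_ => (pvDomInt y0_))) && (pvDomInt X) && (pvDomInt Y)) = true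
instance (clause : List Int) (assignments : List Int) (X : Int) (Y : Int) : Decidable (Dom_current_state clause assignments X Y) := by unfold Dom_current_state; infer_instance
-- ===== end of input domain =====

-- B splits A's single fused loop into a find-first scan for a satisfied literal plus a filter pass; simpler, same values.

-- ===== PORT A =====
-- A's fused loop: accumulates `symbols` and returns early on a satisfied literal.
def csLoopA (assignments : List Int) (X : Int) (Y : Int) :
    List Int → List Int → String × List Int × Int × Int × Int
  | [], symbols =>
    if symbols.length == 1 then ("UNIT", assignments, X, Y, symbols.headD 0)
    else if symbols.length == 0 then ("UNSAT", assignments, X, Y, 0)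
    else ("NEW", assignments, symbols.headD 0, (symbols.drop 1).headD 0, 0)
  | literal :: rest, symbols =>
    let symbols' := if ¬ assignments.contains (-literal) then symbols ++ [literal] else symbols
    if assignments.contains literal then
      if ¬ assignments.contains (-X) then ("SAT", assignments, X, literal, 0)
      else ("SAT", assignments, literal, Y, 0)
    else csLoopA assignments X Y rest symbols'

def current_state (clause : List Int) (assignments : List Int) (X : Int) (Y : Int) : String × List Int × Int × Int × Int :=
  if assignments.contains X || assignments.contains Y then ("SAT", assignments, X, Y, 0)
  else csLoopA assignments X Y clause []

-- ===== PORT B =====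
def current_state_alt (clause : List Int) (assignments : List Int) (X : Int) (Y : Int) : String × List Int × Int × Int × Int :=
  if assignments.contains X || assignments.contains Y then ("SAT", assignments, X, Y, 0)
  else
    match clause.find? (fun l => assignments.contains l) with
    | some sat =>
      if ¬ assignments.contains (-X) then ("SAT", assignments, X, sat, 0)
      else ("SAT", assignments, sat, Y, 0)
    | none =>
      let symbols := clause.filter (fun l => ¬ assignments.contains (-l))
      match symbols with
      | [s] => ("UNIT", assignments, X, Y, s)
      | [] => ("UNSAT", assignments, X, Y, 0)
      | s0 :: s1 :: _ => ("NEW", assignments, s0, s1, 0)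

-- ===== PRECONDITION & SPEC =====
def Spec_current_state (clause : List Int) (assignments : List Int) (X : Int) (Y : Int) (out : String × List Int × Int × Int × Int) : Prop := out = current_state_alt clause assignments X Y
instance (clause : List Int) (assignments : List Int) (X : Int) (Y : Int) (out : String × List Int × Int × Int × Int) : Decidable (Spec_current_state clause assignments X Y out) := by unfold Spec_current_state; infer_instance

-- ===== CLAIM (what is proved, stated in full; the proofs are below) =====
def Claim_equal_current_state : Prop := ∀ (clause : List Int) (assignments : List Int) (X : Int) (Y : Int), Dom_current_state clause assignments X Y → Spec_current_state clause assignments X Y (current_state clause assignments X Y)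

-- ===== LEMMAS AND PROOFS =====

-- The end-of-loop classification, as a function of the final symbols list.
def csFinal (assignments : List Int) (X : Int) (Y : Int) (symbols : List Int) : String × List Int × Int × Int × Int :=
  if symbols.length == 1 then ("UNIT", assignments, X, Y, symbols.headD 0)
  else if symbols.length == 0 then ("UNSAT", assignments, X, Y, 0)
  else ("NEW", assignments, symbols.headD 0, (symbols.drop 1).headD 0, 0)

-- A's fused loop equals B's two separated passes, for any accumulator.
theorem csLoopA_split (assignments : List Int) (X Y : Int) (clause acc : List Int) :
    csLoopA assignments X Y clause acc =
      match clause.find? (fun l => assignments.contains l) with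
      | some sat =>
        if ¬ assignments.contains (-X) then ("SAT", assignments, X, sat, 0)
        else ("SAT", assignments, sat, Y, 0)
      | none => csFinal assignments X Y (acc ++ clause.filter (fun l => ¬ assignments.contains (-l))) := by
  induction clause generalizing acc with
  | nil => simp [csLoopA, csFinal]
  | cons literal rest ih =>
    by_cases h : literal ∈ assignments
    · simp [csLoopA, h]
    · by_cases hneg : (-literal) ∈ assignments <;>
        simp [csLoopA, h, hneg, ih, List.append_assoc]

theorem csFinal_match (assignments : List Int) (X Y : Int) (symbols : List Int) :
    csFinal assignments X Y symbols =
      match symbols with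
      | [s] => ("UNIT", assignments, X, Y, s)
      | [] => ("UNSAT", assignments, X, Y, 0)
      | s0 :: s1 :: _ => ("NEW", assignments, s0, s1, 0) := by
  match symbols with
  | [] => simp [csFinal]
  | [s] => simp [csFinal]
  | s0 :: s1 :: rest => simp [csFinal]

-- ===== VERDICT (by name: the statement is the Claim_ definition above) =====
theorem current_state_spec : Claim_equal_current_state := by
  intro clause assignments X Y _
  unfold Spec_current_state current_state current_state_alt
  by_cases hXY : X ∈ assignments ∨ Y ∈ assignments
  · simp [hXY]
  · rw [csLoopA_split]
    cases hf : clause.find? (fun l => assignments.contains l) with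
    | some sat => simp [hXY]
    | none => simp [hXY, csFinal_match]
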